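-- pv_equiv track=rewrite | github.com/Tom-Edgar/MVPS | HilbertTurtle.py | HL
-- ===== SOURCE A (Python) =====
-- def HL(n):
--     T=[["A"]]
--     for i in range(n):
--         T.append([])
--         for x in T[i]:
--             if x=="A":
--                 for z in ["+","B","F","-","A","F","A","-","F","B","+"]:
--                     T[i+1].append(z)
--             elif x=="B":
--                 for z in ["-","A","F","+","B","F","B","+","F","A","-"]:
--                     T[i+1].append(z)
--             else:
--                 T[i+1].append(x)
--     return T[-1]
-- ===== SOURCE B (Python) =====
-- def _productions(sym):
--     if sym == "A":
--         return ["+", "B", "F", "-", "A", "F", "A", "-", "F", "B", "+"]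
--     if sym == "B":
--         return ["-", "A", "F", "+", "B", "F", "B", "+", "F", "A", "-"]
--     return [sym]
--
-- def _expand(sym, depth):
--     if depth <= 0:
--         return [sym]
--     return [s for z in _productions(sym) for s in _expand(z, depth - 1)]
--
-- def HL(n):
--     return _expand("A", n)
-- ===== Notes on version B (the rewrite author's own statement) =====
-- stated objective: alternative
-- what changed: Replaces the iterative generation-by-generation list rewriting (building all generations T[0..n]) with a depth-first recursive expansion of each symbol to depth n, concatenating sub-expansions.
import Mathlib
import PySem

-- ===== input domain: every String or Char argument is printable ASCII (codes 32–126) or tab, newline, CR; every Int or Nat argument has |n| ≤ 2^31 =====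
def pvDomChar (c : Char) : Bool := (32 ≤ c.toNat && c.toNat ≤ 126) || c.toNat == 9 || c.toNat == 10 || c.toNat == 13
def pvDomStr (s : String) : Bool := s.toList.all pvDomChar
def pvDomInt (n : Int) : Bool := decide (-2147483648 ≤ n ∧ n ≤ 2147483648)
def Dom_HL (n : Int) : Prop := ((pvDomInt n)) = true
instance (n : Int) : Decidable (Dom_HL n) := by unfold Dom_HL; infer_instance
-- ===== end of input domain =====

-- B replaces A's generation-by-generation list rewriting with depth-first recursive
-- expansion of each symbol (objective: alternative decomposition, same cost).

-- ===== PORT A =====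
def pvRuleA : List String := ["+", "B", "F", "-", "A", "F", "A", "-", "F", "B", "+"]
def pvRuleB : List String := ["-", "A", "F", "+", "B", "F", "B", "+", "F", "A", "-"]

-- the inner 'for x in T[i]: … append' loop, as forward structural recursion over T[i]
def pvNextGen : List String → List String
  | [] => []
  | x :: rest =>
    (if x = "A" then pvRuleA
     else if x = "B" then pvRuleB
     else [x]) ++ pvNextGen rest

def HL (n : Int) : List String :=
  PySem.List.pyGetD
    ((PySem.List.pyRange 0 n 1).foldl (fun T i =>
      T ++ [pvNextGen (PySem.List.pyGetD T i [])]) [["A"]])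
    (-1) []

-- ===== PORT B =====
def pvProd (sym : String) : List String :=
  if sym = "A" then ["+", "B", "F", "-", "A", "F", "A", "-", "F", "B", "+"]
  else if sym = "B" then ["-", "A", "F", "+", "B", "F", "B", "+", "F", "A", "-"]
  else [sym]

def pvExpand (sym : String) (depth : Int) : List String :=
  if depth ≤ 0 then [sym]
  else (pvProd sym).flatMap (fun z => pvExpand z (depth - 1))
termination_by depth.toNat
decreasing_by omega

def HL_alt (n : Int) : List String := pvExpand "A" n

-- ===== PRECONDITION & SPEC =====
def Spec_HL (n : Int) (out : List String) : Prop := out = HL_alt n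
instance (n : Int) (out : List String) : Decidable (Spec_HL n out) := by unfold Spec_HL; infer_instance

-- ===== CLAIM (what is proved, stated in full; the proofs are below) =====
def Claim_equal_HL : Prop := ∀ (n : Int), Dom_HL n → Spec_HL n (HL n)

-- ===== LEMMAS AND PROOFS =====

/-- One rewriting step of the L-system. -/
def pvStep (g : List String) : List String := g.flatMap pvProd

/-- `k` rewriting steps. -/
def pvIter : Nat → List String → List String
  | 0, g => g
  | k + 1, g => pvStep (pvIter k g)

theorem pvNextGen_eq (g : List String) : pvNextGen g = pvStep g := by
  induction g with
  | nil => rfl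
  | cons x g ih => simp [pvNextGen, pvStep, ih, pvProd, pvRuleA, pvRuleB]

theorem pvIter_step_comm (k : Nat) (g : List String) :
    pvIter k (pvStep g) = pvStep (pvIter k g) := by
  induction k with
  | zero => rfl
  | succ k ih => simp [pvIter, ih]

theorem pvIter_append (k : Nat) (a b : List String) :
    pvIter k (a ++ b) = pvIter k a ++ pvIter k b := by
  induction k generalizing a b with
  | zero => rfl
  | succ k ih => simp [pvIter, ih, pvStep]

theorem pvIter_nil (k : Nat) : pvIter k [] = [] := by
  induction k with
  | zero => rfl
  | succ k ih => simp [pvIter, ih, pvStep]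

theorem pvIter_flatMap (k : Nat) (g : List String) :
    g.flatMap (fun z => pvIter k [z]) = pvIter k g := by
  induction g with
  | nil => simp [pvIter_nil]
  | cons z g ih =>
    have : z :: g = [z] ++ g := rfl
    rw [this, pvIter_append]
    simp [ih]

theorem expand_eq (k : Nat) (sym : String) :
    pvExpand sym (k : Nat) = pvIter k [sym] := by
  induction k generalizing sym with
  | zero => simp [pvExpand, pvIter]
  | succ k ih =>
    rw [pvExpand]
    have h : ¬ ((k + 1 : Nat) : Int) ≤ 0 := by omega
    simp only [h, if_false]
    have hc : ((k + 1 : Nat) : Int) - 1 = (k : Int) := by omega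
    rw [hc]
    have : (pvProd sym).flatMap (fun z => pvExpand z (k : Nat)) =
        (pvProd sym).flatMap (fun z => pvIter k [z]) := by
      apply List.flatMap_congr; intro z _; exact ih z
    have hps : pvProd sym = pvStep [sym] := by simp [pvStep]
    rw [this, pvIter_flatMap, hps, pvIter_step_comm]
    rfl

theorem A_inv (m : Nat) :
    (PySem.List.pyRange 0 (m : Int) 1).foldl (fun T i =>
      T ++ [pvNextGen (PySem.List.pyGetD T i [])]) [["A"]] =
    (List.range (m + 1)).map (fun j => pvIter j ["A"]) := by
  induction m with
  | zero => simp [PySem.List.pyRange_one_eq_nil, pvIter]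
  | succ m ih =>
    have hsplit : PySem.List.pyRange 0 ((m + 1 : Nat) : Int) 1 =
        PySem.List.pyRange 0 (m : Int) 1 ++ [(m : Int)] := by
      have : ((m + 1 : Nat) : Int) = (m : Int) + 1 := by omega
      rw [this, PySem.List.pyRange_one_succ_right (by omega)]
    rw [hsplit, List.foldl_append, ih]
    simp only [List.foldl_cons, List.foldl_nil]
    have hget : PySem.List.pyGetD ((List.range (m + 1)).map (fun j => pvIter j ["A"])) (m : Int) []
        = pvIter m ["A"] := by
      rw [PySem.List.pyGetD_natCast]
      simp [List.getD]
    rw [hget, pvNextGen_eq]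
    rw [List.range_succ (n := m + 1), List.map_append]
    simp [pvIter]

theorem HL_eq (n : Int) : HL n = HL_alt n := by
  by_cases h : n ≤ 0
  · unfold HL HL_alt
    rw [PySem.List.pyRange_one_eq_nil h]
    rw [pvExpand]
    simp only [h, if_true]
    decide
  · have hn : n = ((n.toNat : Nat) : Int) := by omega
    unfold HL HL_alt
    rw [hn, A_inv, expand_eq]
    rw [List.range_succ, List.map_append]
    simp only [List.map_cons, List.map_nil]
    rw [PySem.List.pyGetD_neg_one_append_singleton]

-- ===== VERDICT (by name: the statement is the Claim_ definition above) =====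
theorem HL_spec : Claim_equal_HL := by
  intro n _
  unfold Spec_HL
  exact HL_eq n
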